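-- pv_equiv track=rewrite | github.com/scey26/srdualglow | TEMP/temp2_failure/train.py | calc_cond_shapes
-- ===== SOURCE A (Python) =====
-- def calc_z_shapes2(n_channel, image_size, n_block, split_type):
--     # calculates shapes of z's after SPLIT operation (after Block operations) - e.g. channels: 6, 12, 24, 96
--     z_shapes = []
--     for i in range(n_block - 1):
--         image_size = (image_size[0] // 2, image_size[1] // 2)
--         n_channel = n_channel * 2 if split_type == 'regular' else 9  # now only supports split_sections [3, 9]
--
--         shape = (n_channel, *image_size)
--         z_shapes.append(shape)
--
--     # for the very last block where we have no split operation
--     image_size = (image_size[0] // 2, image_size[1] // 2)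
--     shape = (n_channel * 4, *image_size) if split_type == 'regular' else (12, *image_size)
--     z_shapes.append(shape)
--     return z_shapes
--
-- def calc_inp_shapes(n_channels, image_size, n_blocks, split_type):
--     # calculates z shapes (inputs) after SQUEEZE operation (before Block operations) - e.g. channels: 12, 24, 48, 96
--     z_shapes = calc_z_shapes2(n_channels, image_size, n_blocks, split_type)
--     input_shapes = []
--     for i in range(len(z_shapes)):
--         if i < len(z_shapes) - 1:
--             channels = z_shapes[i][0] * 2 if split_type == 'regular' else 12  # now only supports split_sections [3, 9]
--             input_shapes.append((channels, z_shapes[i][1], z_shapes[i][2]))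
--         else:
--             input_shapes.append((z_shapes[i][0], z_shapes[i][1], z_shapes[i][2]))
--     return input_shapes
--
-- def calc_cond_shapes(n_channels, image_size, n_blocks, split_type, condition):
--     # computes additional channels dimensions based on additional conditions: left input + condition
--     input_shapes = calc_inp_shapes(n_channels, image_size, n_blocks, split_type)
--     cond_shapes = []
--     for block_idx in range(len(input_shapes)):
--         shape = [input_shapes[block_idx][0], input_shapes[block_idx][1], input_shapes[block_idx][2]]  # from left glow
--         if 'b_maps' in condition:
--             shape[0] += 3   # down-sampled image with 3 channels
--         cond_shapes.append(tuple(shape))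
--     return cond_shapes
-- ===== SOURCE B (Python) =====
-- def calc_cond_shapes(n_channels, image_size, n_blocks, split_type, condition):
--     # one fused loop: block i gets channels 4*n_channels*2**i ('regular') or 12, image halved i+1 times
--     num = n_blocks if n_blocks >= 1 else 1
--     extra = 3 if 'b_maps' in condition else 0
--     h, w = image_size
--     c = n_channels * 4 if split_type == 'regular' else 12
--     out = []
--     for _ in range(num):
--         h, w = h // 2, w // 2
--         out.append((c + extra, h, w))
--         if split_type == 'regular':
--             c *= 2
--     return out
-- ===== Notes on version B (the rewrite author's own statement) =====
-- stated objective: simpler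
-- what changed: Replaced A's three-function chain (z-shapes table, then input-shapes table, then cond-shapes table) with a single loop that directly emits each block's cond shape, maintaining the halved image size and doubling channel count as loop state.
import Mathlib
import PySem

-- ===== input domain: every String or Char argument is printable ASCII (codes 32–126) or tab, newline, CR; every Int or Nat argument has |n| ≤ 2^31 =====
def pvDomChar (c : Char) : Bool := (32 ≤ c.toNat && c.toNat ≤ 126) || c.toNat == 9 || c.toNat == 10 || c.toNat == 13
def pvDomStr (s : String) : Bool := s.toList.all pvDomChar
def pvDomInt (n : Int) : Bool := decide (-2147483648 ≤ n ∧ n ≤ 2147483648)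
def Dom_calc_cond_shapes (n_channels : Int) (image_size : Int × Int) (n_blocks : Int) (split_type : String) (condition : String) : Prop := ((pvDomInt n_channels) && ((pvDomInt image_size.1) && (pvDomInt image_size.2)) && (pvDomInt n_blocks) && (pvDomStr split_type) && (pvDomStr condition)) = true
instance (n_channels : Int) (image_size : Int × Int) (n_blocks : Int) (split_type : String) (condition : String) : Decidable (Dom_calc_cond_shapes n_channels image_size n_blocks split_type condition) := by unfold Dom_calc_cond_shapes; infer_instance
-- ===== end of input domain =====

-- B fuses A's three-function chain (z-shapes, input-shapes, cond-shapes tables) into one loop; objective: simpler.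


-- ===== PORT A =====
def calc_z_shapes2 (n_channel : Int) (image_size : Int × Int) (n_block : Int) (split_type : String) : List (Int × Int × Int) :=
  let st := (PySem.List.pyRange 0 (n_block - 1) 1).foldl
      (fun (st : Int × (Int × Int) × List (Int × Int × Int)) _ =>
        let img := (PySem.Int.floordiv st.2.1.1 2, PySem.Int.floordiv st.2.1.2 2)
        let nc := if split_type == "regular" then st.1 * 2 else 9
        (nc, img, st.2.2 ++ [(nc, img.1, img.2)]))
      (n_channel, image_size, ([] : List (Int × Int × Int)))
  let image_size := (PySem.Int.floordiv st.2.1.1 2, PySem.Int.floordiv st.2.1.2 2)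
  let shape := if split_type == "regular" then (st.1 * 4, image_size.1, image_size.2) else ((12 : Int), image_size.1, image_size.2)
  st.2.2 ++ [shape]

def calc_inp_shapes (n_channels : Int) (image_size : Int × Int) (n_blocks : Int) (split_type : String) : List (Int × Int × Int) :=
  let z_shapes := calc_z_shapes2 n_channels image_size n_blocks split_type
  (PySem.List.pyRange 0 (PySem.List.len z_shapes) 1).foldl
    (fun (acc : List (Int × Int × Int)) i =>
      let zi := PySem.List.pyGetD z_shapes i (0, 0, 0)   -- index always in range in A
      if i < PySem.List.len z_shapes - 1 then
        let channels := if split_type == "regular" then zi.1 * 2 else 12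
        acc ++ [(channels, zi.2.1, zi.2.2)]
      else
        acc ++ [(zi.1, zi.2.1, zi.2.2)])
    []

def calc_cond_shapes (n_channels : Int) (image_size : Int × Int) (n_blocks : Int) (split_type : String) (condition : String) : List (Int × Int × Int) :=
  let input_shapes := calc_inp_shapes n_channels image_size n_blocks split_type
  (PySem.List.pyRange 0 (PySem.List.len input_shapes) 1).foldl
    (fun (acc : List (Int × Int × Int)) block_idx =>
      let s := PySem.List.pyGetD input_shapes block_idx (0, 0, 0)
      let s := if PySem.Str.isIn "b_maps" condition then (s.1 + 3, s.2.1, s.2.2) else s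
      acc ++ [s])
    []

-- ===== PORT B =====
def calc_cond_shapes_alt (n_channels : Int) (image_size : Int × Int) (n_blocks : Int) (split_type : String) (condition : String) : List (Int × Int × Int) :=
  let num := if n_blocks ≥ 1 then n_blocks else 1
  let extra : Int := if PySem.Str.isIn "b_maps" condition then 3 else 0
  let c0 : Int := if split_type == "regular" then n_channels * 4 else 12
  let st := (PySem.List.pyRange 0 num 1).foldl
      (fun (st : (Int × Int) × Int × List (Int × Int × Int)) _ =>
        let h := PySem.Int.floordiv st.1.1 2
        let w := PySem.Int.floordiv st.1.2 2
        let out := st.2.2 ++ [(st.2.1 + extra, h, w)]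
        let c := if split_type == "regular" then st.2.1 * 2 else st.2.1
        ((h, w), c, out))
      (image_size, c0, ([] : List (Int × Int × Int)))
  st.2.2

-- ===== PRECONDITION & SPEC =====
def Spec_calc_cond_shapes (n_channels : Int) (image_size : Int × Int) (n_blocks : Int) (split_type : String) (condition : String) (out : List (Int × Int × Int)) : Prop := out = calc_cond_shapes_alt n_channels image_size n_blocks split_type condition
instance (n_channels : Int) (image_size : Int × Int) (n_blocks : Int) (split_type : String) (condition : String) (out : List (Int × Int × Int)) : Decidable (Spec_calc_cond_shapes n_channels image_size n_blocks split_type condition out) := by unfold Spec_calc_cond_shapes; infer_instance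

-- ===== CLAIM (what is proved, stated in full; the proofs are below) =====
def Claim_equal_calc_cond_shapes : Prop := ∀ (n_channels : Int) (image_size : Int × Int) (n_blocks : Int) (split_type : String) (condition : String), Dom_calc_cond_shapes n_channels image_size n_blocks split_type condition → Spec_calc_cond_shapes n_channels image_size n_blocks split_type condition (calc_cond_shapes n_channels image_size n_blocks split_type condition)

-- ===== LEMMAS AND PROOFS =====

-- halving the image size (one '//2' step on both coordinates)
def pvHalve (p : Int × Int) : Int × Int := (PySem.Int.floordiv p.1 2, PySem.Int.floordiv p.2 2)

-- common closed form both ports reduce to: m+1 blocks, block i has channels nc*2^(i+2) (regular) / 12 plus extra, image halved i+1 times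
def pvSpec (nc : Int) (img : Int × Int) (m : Nat) (reg : Bool) (extra : Int) : List (Int × Int × Int) :=
  (List.range (m + 1)).map (fun i =>
    ((if reg then nc * 2 ^ (i + 2) else 12) + extra, (pvHalve^[i + 1] img).1, (pvHalve^[i + 1] img).2))

lemma pvFoldlIgnore {α β : Type} (g : α → α) : ∀ (l : List β) (init : α),
    l.foldl (fun s _ => g s) init = g^[l.length] init := by
  intro l
  induction l with
  | nil => intro init; rfl
  | cons x xs ih =>
    intro init
    simp [List.foldl_cons, ih, Function.iterate_succ_apply]

lemma pvBiterReg (extra : Int) :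
    ∀ (n : Nat) (img : Int × Int) (c : Int) (out : List (Int × Int × Int)),
    (fun (st : (Int × Int) × Int × List (Int × Int × Int)) =>
        ((PySem.Int.floordiv st.1.1 2, PySem.Int.floordiv st.1.2 2), st.2.1 * 2,
          st.2.2 ++ [(st.2.1 + extra, PySem.Int.floordiv st.1.1 2, PySem.Int.floordiv st.1.2 2)]))^[n] (img, c, out)
      = (pvHalve^[n] img, c * 2 ^ n,
          out ++ (List.range n).map (fun i => (c * 2 ^ i + extra, (pvHalve^[i + 1] img).1, (pvHalve^[i + 1] img).2))) := by
  intro n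
  induction n with
  | zero => intro img c out; simp
  | succ n ih =>
    intro img c out
    rw [Function.iterate_succ_apply, ih]
    simp only [List.range_succ_eq_map, List.map_cons, List.map_map]
    refine Prod.ext ?_ (Prod.ext ?_ ?_)
    · simp [pvHalve]
    · simp; ring
    · show _ ++ _ = _
      simp only [List.cons_append, List.append_assoc]
      congr 1
      simp only [pow_zero, List.cons.injEq]
      constructor
      · simp [pvHalve]
      · apply List.map_congr_left
        intro i _
        simp [Function.comp, pvHalve]
        ring

lemma pvBiterNon (extra : Int) :
    ∀ (n : Nat) (img : Int × Int) (c : Int) (out : List (Int × Int × Int)),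
    (fun (st : (Int × Int) × Int × List (Int × Int × Int)) =>
        ((PySem.Int.floordiv st.1.1 2, PySem.Int.floordiv st.1.2 2), st.2.1,
          st.2.2 ++ [(st.2.1 + extra, PySem.Int.floordiv st.1.1 2, PySem.Int.floordiv st.1.2 2)]))^[n] (img, c, out)
      = (pvHalve^[n] img, c,
          out ++ (List.range n).map (fun i => (c + extra, (pvHalve^[i + 1] img).1, (pvHalve^[i + 1] img).2))) := by
  intro n
  induction n with
  | zero => intro img c out; simp
  | succ n ih =>
    intro img c out
    rw [Function.iterate_succ_apply, ih]
    simp [List.range_succ_eq_map, Function.comp, pvHalve, Function.iterate_succ_apply]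

lemma pvB_eq (nc : Int) (img : Int × Int) (nb : Int) (st cond : String) :
    calc_cond_shapes_alt nc img nb st cond =
      pvSpec nc img ((nb - 1).toNat) (st == "regular") (if PySem.Str.isIn "b_maps" cond then 3 else 0) := by
  have hnum : (if nb ≥ 1 then nb else 1) = (((nb - 1).toNat + 1 : Nat) : Int) := by
    split_ifs with h <;> omega
  simp only [calc_cond_shapes_alt, hnum]
  rw [pvFoldlIgnore]
  rw [PySem.List.length_pyRange_one]
  cases hreg : (st == "regular") with
  | true =>
    simp only [if_true]
    have : ((((nb - 1).toNat + 1 : Nat) : Int) - 0).toNat = (nb - 1).toNat + 1 := by omega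
    rw [this, pvBiterReg]
    simp only [pvSpec, List.nil_append]
    apply List.map_congr_left
    intro i _
    simp [pow_add]
    ring
  | false =>
    simp only [Bool.false_eq_true, if_false]
    have : ((((nb - 1).toNat + 1 : Nat) : Int) - 0).toNat = (nb - 1).toNat + 1 := by omega
    rw [this, pvBiterNon]
    simp only [pvSpec, Bool.false_eq_true, if_false, List.nil_append]

lemma pvFoldlAppendIte {α β : Type} (c : β → Prop) [DecidablePred c] (u v : β → α) :
    ∀ (l : List β) (init : List α),
    l.foldl (fun acc x => if c x then acc ++ [u x] else acc ++ [v x]) init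
      = init ++ l.map (fun x => if c x then u x else v x) := by
  intro l
  induction l with
  | nil => intro init; simp
  | cons x xs ih =>
    intro init
    simp only [List.foldl_cons, List.map_cons, ih]
    split_ifs <;> simp

lemma pvZiterReg :
    ∀ (n : Nat) (c : Int) (img : Int × Int) (zs : List (Int × Int × Int)),
    (fun (st : Int × (Int × Int) × List (Int × Int × Int)) =>
        (st.1 * 2, (PySem.Int.floordiv st.2.1.1 2, PySem.Int.floordiv st.2.1.2 2),
          st.2.2 ++ [(st.1 * 2, PySem.Int.floordiv st.2.1.1 2, PySem.Int.floordiv st.2.1.2 2)]))^[n] (c, img, zs)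
      = (c * 2 ^ n, pvHalve^[n] img,
          zs ++ (List.range n).map (fun i => (c * 2 ^ (i + 1), (pvHalve^[i + 1] img).1, (pvHalve^[i + 1] img).2))) := by
  intro n
  induction n with
  | zero => intro c img zs; simp
  | succ n ih =>
    intro c img zs
    rw [Function.iterate_succ_apply, ih]
    simp [List.range_succ_eq_map, Function.comp, pvHalve, Function.iterate_succ_apply]
    constructor
    · ring
    · intro a _
      ring

lemma pvZiterNon :
    ∀ (n : Nat) (c : Int) (img : Int × Int) (zs : List (Int × Int × Int)),
    (fun (st : Int × (Int × Int) × List (Int × Int × Int)) =>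
        ((9 : Int), (PySem.Int.floordiv st.2.1.1 2, PySem.Int.floordiv st.2.1.2 2),
          st.2.2 ++ [((9 : Int), PySem.Int.floordiv st.2.1.1 2, PySem.Int.floordiv st.2.1.2 2)]))^[n] (c, img, zs)
      = ((if n = 0 then c else 9), pvHalve^[n] img,
          zs ++ (List.range n).map (fun i => ((9 : Int), (pvHalve^[i + 1] img).1, (pvHalve^[i + 1] img).2))) := by
  intro n
  induction n with
  | zero => intro c img zs; simp
  | succ n ih =>
    intro c img zs
    rw [Function.iterate_succ_apply, ih]
    simp [List.range_succ_eq_map, Function.comp, pvHalve, Function.iterate_succ_apply]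

lemma pvHalveIter (img : Int × Int) (k : Nat) :
    (PySem.Int.floordiv (pvHalve^[k] img).1 2, PySem.Int.floordiv (pvHalve^[k] img).2 2) = pvHalve^[k + 1] img := by
  rw [Function.iterate_succ_apply']
  rfl

lemma pvZ_eq (nc : Int) (img : Int × Int) (nb : Int) (st : String) :
    calc_z_shapes2 nc img nb st =
      (List.range ((nb - 1).toNat)).map (fun i =>
          ((if st == "regular" then nc * 2 ^ (i + 1) else 9), (pvHalve^[i + 1] img).1, (pvHalve^[i + 1] img).2))
        ++ [((if st == "regular" then nc * 2 ^ ((nb - 1).toNat + 2) else 12),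
             (pvHalve^[(nb - 1).toNat + 1] img).1, (pvHalve^[(nb - 1).toNat + 1] img).2)] := by
  have hlen : ((nb - 1) - 0).toNat = (nb - 1).toNat := by omega
  cases hreg : (st == "regular") with
  | true =>
    simp only [calc_z_shapes2, hreg, if_true]
    rw [pvFoldlIgnore, PySem.List.length_pyRange_one, hlen, pvZiterReg]
    simp only [List.nil_append, pvHalveIter]
    have h4 : nc * 2 ^ ((nb - 1).toNat) * 4 = nc * 2 ^ ((nb - 1).toNat + 2) := by ring
    rw [h4]
  | false =>
    simp only [calc_z_shapes2, hreg, Bool.false_eq_true, if_false]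
    rw [pvFoldlIgnore, PySem.List.length_pyRange_one, hlen, pvZiterNon]
    simp only [List.nil_append, pvHalveIter]

lemma pvInp_eq (nc : Int) (img : Int × Int) (nb : Int) (st : String) :
    calc_inp_shapes nc img nb st =
      (List.range ((nb - 1).toNat + 1)).map (fun i =>
        ((if st == "regular" then nc * 2 ^ (i + 2) else 12), (pvHalve^[i + 1] img).1, (pvHalve^[i + 1] img).2)) := by
  simp only [calc_inp_shapes, pvZ_eq]
  have hlen : PySem.List.len
      ((List.range ((nb - 1).toNat)).map (fun i =>
          ((if st == "regular" then nc * 2 ^ (i + 1) else 9), (pvHalve^[i + 1] img).1, (pvHalve^[i + 1] img).2))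
        ++ [((if st == "regular" then nc * 2 ^ ((nb - 1).toNat + 2) else 12),
             (pvHalve^[(nb - 1).toNat + 1] img).1, (pvHalve^[(nb - 1).toNat + 1] img).2)])
      = (((nb - 1).toNat + 1 : Nat) : Int) := by
    simp
  rw [hlen, pvFoldlAppendIte, PySem.List.pyRange_zero_natCast, List.map_map, List.nil_append]
  apply List.map_congr_left
  intro k hk
  have hk' : k < (nb - 1).toNat + 1 := List.mem_range.mp hk
  simp only [Function.comp_apply, PySem.List.pyGetD_natCast]
  by_cases hk2 : k < (nb - 1).toNat
  · rw [if_pos (by push_cast; omega)]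
    rw [List.getD_append _ _ _ _ (by simpa using hk2)]
    rw [List.getD_eq_getElem _ _ (by simpa using hk2)]
    simp only [List.getElem_map, List.getElem_range]
    cases hreg : (st == "regular") with
    | true =>
      simp only [if_true]
      have : nc * 2 ^ (k + 1) * 2 = nc * 2 ^ (k + 2) := by ring
      rw [this]
    | false => simp only [Bool.false_eq_true, if_false]
  · have hkm : k = (nb - 1).toNat := by omega
    rw [if_neg (by push_cast; omega)]
    subst hkm
    rw [List.getD_append_right _ _ _ _ (by simp)]
    simp

lemma pvA_eq (nc : Int) (img : Int × Int) (nb : Int) (st cond : String) :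
    calc_cond_shapes nc img nb st cond =
      pvSpec nc img ((nb - 1).toNat) (st == "regular") (if PySem.Str.isIn "b_maps" cond then 3 else 0) := by
  simp only [calc_cond_shapes, pvInp_eq]
  have hlen : PySem.List.len
      ((List.range ((nb - 1).toNat + 1)).map (fun i =>
        ((if st == "regular" then nc * 2 ^ (i + 2) else 12), (pvHalve^[i + 1] img).1, (pvHalve^[i + 1] img).2)))
      = (((nb - 1).toNat + 1 : Nat) : Int) := by simp
  rw [hlen, PySem.List.foldl_append_singleton_eq_map, PySem.List.pyRange_zero_natCast, List.map_map,
    List.nil_append]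
  unfold pvSpec
  apply List.map_congr_left
  intro k hk
  have hk' : k < (nb - 1).toNat + 1 := List.mem_range.mp hk
  simp only [Function.comp_apply, PySem.List.pyGetD_natCast]
  rw [List.getD_eq_getElem _ _ (by simpa using hk')]
  simp only [List.getElem_map, List.getElem_range]
  cases hbm : PySem.Str.isIn "b_maps" cond with
  | true => simp only [if_true]
  | false => simp only [Bool.false_eq_true, if_false, add_zero]

-- ===== VERDICT (by name: the statement is the Claim_ definition above) =====
theorem calc_cond_shapes_spec : Claim_equal_calc_cond_shapes := by
  intro nc img nb st cond _
  unfold Spec_calc_cond_shapes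
  rw [pvA_eq, pvB_eq]
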